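-- pv_equiv track=rewrite | github.com/berdichevskyivan/cosmic_cryptanalysis | simple-pattern-finding.py | find_prime_number_occurrences
-- ===== SOURCE A (Python) =====
-- def find_prime_number_occurrences(pi_digits, primes):
--     prime_occurrences = {}
--     for prime in primes:
--         prime_str = str(prime)
--         if prime_str in pi_digits:
--             occurrences = [pos for pos in range(len(pi_digits)) if pi_digits.startswith(prime_str, pos)]
--             prime_occurrences[prime] = occurrences
--     return prime_occurrences
-- ===== SOURCE B (Python) =====
-- def find_prime_number_occurrences(pi_digits, primes):
--     prime_occurrences = {}
--     for prime in primes: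
--         prime_str = str(prime)
--         occurrences = []
--         pos = pi_digits.find(prime_str)
--         while pos != -1:
--             occurrences.append(pos)
--             pos = pi_digits.find(prime_str, pos + 1)
--         if occurrences:
--             prime_occurrences[prime] = occurrences
--     return prime_occurrences
-- ===== Notes on version B (the rewrite author's own statement) =====
-- stated objective: alternative
-- what changed: Replaces the per-prime scan that tests startswith at every position of pi_digits (plus a separate 'in' substring pre-check) with a str.find loop per prime that jumps from one occurrence to the next; the membership pre-check disappears since the loop itself detects absence.
import Mathlib
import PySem

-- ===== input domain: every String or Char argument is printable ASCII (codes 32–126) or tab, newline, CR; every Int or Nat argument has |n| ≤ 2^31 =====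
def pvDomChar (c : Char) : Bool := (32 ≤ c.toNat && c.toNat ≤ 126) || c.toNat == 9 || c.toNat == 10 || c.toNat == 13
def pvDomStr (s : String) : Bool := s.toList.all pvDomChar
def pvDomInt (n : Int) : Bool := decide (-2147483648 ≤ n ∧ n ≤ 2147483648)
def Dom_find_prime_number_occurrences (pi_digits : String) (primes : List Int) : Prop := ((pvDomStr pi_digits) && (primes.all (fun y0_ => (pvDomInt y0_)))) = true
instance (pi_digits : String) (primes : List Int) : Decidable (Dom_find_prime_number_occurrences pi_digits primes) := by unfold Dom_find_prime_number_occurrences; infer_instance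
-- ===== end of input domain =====

-- B replaces A's scan of every position (startswith at each pos, after an 'in' pre-check)
-- with a str.find loop that jumps from one occurrence to the next; same return value.

-- ===== PORT A =====
-- pi_digits.startswith(prime_str, pos) with 0 ≤ pos < len(pi_digits) is ported as a
-- prefix test on the drop at pos — exact on that range of pos.
def find_prime_number_occurrences (pi_digits : String) (primes : List Int) : List (Int × List Int) :=
  (primes.foldl (fun (d : PySem.Dict Int (List Int)) prime =>
      let prime_str := PySem.Int.toStr prime
      if PySem.Str.isIn prime_str pi_digits then
        let occurrences := (PySem.List.pyRange 0 (PySem.Str.len pi_digits) 1).filter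
            (fun pos => PySem.Chars.startswith (pi_digits.toList.drop pos.toNat) prime_str.toList)
        d.insert prime occurrences
      else d) PySem.Dict.empty).items

-- ===== PORT B =====
-- B's 'while pos != -1' loop; the fuel argument only bounds the recursion (each found
-- position is strictly larger than the last, so len+1 steps always suffice).
def pvFindAll (s p : String) : Nat → Int → List Int
  | 0, _ => []
  | fuel+1, pos =>
      if pos = -1 then []
      else pos :: pvFindAll s p fuel (PySem.Str.findFrom s p (pos + 1))

def find_prime_number_occurrences_alt (pi_digits : String) (primes : List Int) : List (Int × List Int) :=
  (primes.foldl (fun (d : PySem.Dict Int (List Int)) prime =>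
      let prime_str := PySem.Int.toStr prime
      let occurrences := pvFindAll pi_digits prime_str (pi_digits.toList.length + 1)
        (PySem.Str.find pi_digits prime_str)
      if occurrences.isEmpty then d else d.insert prime occurrences) PySem.Dict.empty).items

-- ===== PRECONDITION & SPEC =====
def Spec_find_prime_number_occurrences (pi_digits : String) (primes : List Int) (out : List (Int × List Int)) : Prop := out = find_prime_number_occurrences_alt pi_digits primes
instance (pi_digits : String) (primes : List Int) (out : List (Int × List Int)) : Decidable (Spec_find_prime_number_occurrences pi_digits primes out) := by unfold Spec_find_prime_number_occurrences; infer_instance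

-- ===== CLAIM (what is proved, stated in full; the proofs are below) =====
def Claim_equal_find_prime_number_occurrences : Prop := ∀ (pi_digits : String) (primes : List Int), Dom_find_prime_number_occurrences pi_digits primes → Spec_find_prime_number_occurrences pi_digits primes (find_prime_number_occurrences pi_digits primes)

-- ===== LEMMAS AND PROOFS =====

-- str(prime) is never empty.
lemma pv_toChars_ne_nil (n : Int) : (PySem.Int.toStr n).toList ≠ [] := by
  rw [PySem.Int.toList_toStr]
  unfold PySem.Int.toChars
  split
  · simp
  · have := Nat.length_toDigits_pos (b := 10) (n := n.toNat)
    intro h; rw [h] at this; simp at this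

-- a prefix at a position ≥ k is an infix of the drop at k
lemma pv_prefix_drop_infix (cs p : List Char) (k j : Nat) (hkj : k ≤ j)
    (h : p <+: cs.drop j) : p <:+: cs.drop k := by
  have hd : cs.drop j = (cs.drop k).drop (j - k) := by
    rw [List.drop_drop]; congr 1; omega
  rw [hd] at h
  exact h.isInfix.trans (List.drop_suffix _ _).isInfix

-- the find loop starting at k returns exactly the match positions in [k, len), ascending
lemma pv_loop_eq (s p : String) (hp : p.toList ≠ []) :
    ∀ (fuel k : Nat), k ≤ s.toList.length → s.toList.length + 1 - k ≤ fuel →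
    pvFindAll s p fuel (PySem.Str.findFrom s p (k : Int)) =
      ((List.range' k (s.toList.length - k)).filter
        (fun pos => PySem.Chars.startswith (s.toList.drop pos) p.toList)).map Int.ofNat := by
  intro fuel
  induction fuel with
  | zero => intro k hk hf; omega
  | succ fuel ih =>
    intro k hk hf
    rw [PySem.Str.findFrom_eq]
    by_cases hi : PySem.Chars.findFrom s.toList p.toList (k : Int) = -1
    · rw [pvFindAll, if_pos hi]
      have hni : ¬ p.toList <:+: s.toList.drop k :=
        (PySem.Chars.findFrom_natCast_eq_neg_one_iff s.toList p.toList k hk).mp hi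
      have : (List.range' k (s.toList.length - k)).filter
          (fun pos => PySem.Chars.startswith (s.toList.drop pos) p.toList) = [] := by
        rw [List.filter_eq_nil_iff]
        intro j hj hs
        exact hni (pv_prefix_drop_infix s.toList p.toList k j
          (List.mem_range'_1.mp hj).1 ((PySem.Chars.startswith_iff _ _).mp hs))
      rw [this]; rfl
    · obtain ⟨hki, hpref, hmin⟩ :=
        PySem.Chars.findFrom_natCast_spec s.toList p.toList k hk hi
      set i := PySem.Chars.findFrom s.toList p.toList (k : Int) with hidef
      have h0i : 0 ≤ i := le_trans (by exact_mod_cast Int.natCast_nonneg k) hki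
      have hcast : ((i.toNat : Nat) : Int) = i := Int.toNat_of_nonneg h0i
      have hkle : k ≤ i.toNat := by omega
      have hilt : i.toNat < s.toList.length := by
        by_contra hge
        have : s.toList.drop i.toNat = [] := List.drop_eq_nil_of_le (by omega)
        rw [this] at hpref
        exact hp (List.prefix_nil.mp hpref)
      -- split the range at the found position
      have hsplit : List.range' k (s.toList.length - k) =
          List.range' k (i.toNat - k) ++
            (i.toNat :: List.range' (i.toNat + 1) (s.toList.length - (i.toNat + 1))) := by
        have h1 : List.range' i.toNat (s.toList.length - i.toNat) =
            i.toNat :: List.range' (i.toNat + 1) (s.toList.length - (i.toNat + 1)) := by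
          have : s.toList.length - i.toNat = (s.toList.length - (i.toNat + 1)) + 1 := by omega
          rw [this, List.range'_succ]
        have h2 := List.range'_append (s := k) (m := i.toNat - k)
          (n := s.toList.length - i.toNat) (step := 1)
        simp only [one_mul] at h2
        rw [show k + (i.toNat - k) = i.toNat by omega] at h2
        rw [show s.toList.length - k = (i.toNat - k) + (s.toList.length - i.toNat) by omega]
        rw [← h2, h1]
      have hfilter1 : (List.range' k (i.toNat - k)).filter
          (fun pos => PySem.Chars.startswith (s.toList.drop pos) p.toList) = [] := by
        rw [List.filter_eq_nil_iff]
        intro j hj hs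
        have hjm := List.mem_range'_1.mp hj
        exact hmin j hjm.1 (by omega) ((PySem.Chars.startswith_iff _ _).mp hs)
      have hhead : PySem.Chars.startswith (s.toList.drop i.toNat) p.toList = true :=
        (PySem.Chars.startswith_iff _ _).mpr hpref
      rw [pvFindAll, if_neg hi, hsplit, List.filter_append, hfilter1, List.nil_append]
      simp only [List.filter_cons, hhead, if_true, List.map_cons]
      have hrec : pvFindAll s p fuel (PySem.Str.findFrom s p (i + 1)) =
          ((List.range' (i.toNat + 1) (s.toList.length - (i.toNat + 1))).filter
            (fun pos => PySem.Chars.startswith (s.toList.drop pos) p.toList)).map Int.ofNat := by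
        have : i + 1 = ((i.toNat + 1 : Nat) : Int) := by push_cast [hcast]; ring
        rw [this]
        exact ih (i.toNat + 1) (by omega) (by omega)
      rw [hrec]
      congr 1
      exact_mod_cast hcast.symm

-- A's comprehension equals the Nat-level filtered range
lemma pv_occA_eq (s : String) (p : String) :
    (PySem.List.pyRange 0 (PySem.Str.len s) 1).filter
        (fun pos => PySem.Chars.startswith (s.toList.drop pos.toNat) p.toList) =
      ((List.range' 0 s.toList.length).filter
        (fun pos => PySem.Chars.startswith (s.toList.drop pos) p.toList)).map Int.ofNat := by
  have hlen : (PySem.Str.len s - 0).toNat = s.toList.length := by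
    simp [PySem.Str.len]
  rw [PySem.List.pyRange_one, List.filter_map, hlen, List.range_eq_range']
  congr 1
  · funext k
    simp
  · congr 1
    funext k
    simp

-- per-prime: the two loop bodies agree
lemma pv_step_eq (s : String) (prime : Int) (d : PySem.Dict Int (List Int)) :
    (let prime_str := PySem.Int.toStr prime
     if PySem.Str.isIn prime_str s then
       let occurrences := (PySem.List.pyRange 0 (PySem.Str.len s) 1).filter
           (fun pos => PySem.Chars.startswith (s.toList.drop pos.toNat) prime_str.toList)
       d.insert prime occurrences
     else d) =
    (let prime_str := PySem.Int.toStr prime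
     let occurrences := pvFindAll s prime_str (s.toList.length + 1)
       (PySem.Str.find s prime_str)
     if occurrences.isEmpty then d else d.insert prime occurrences) := by
  simp only
  set p := PySem.Int.toStr prime with hpdef
  have hp : p.toList ≠ [] := pv_toChars_ne_nil prime
  have hfind : PySem.Str.find s p = PySem.Str.findFrom s p ((0 : Nat) : Int) := by
    rw [PySem.Str.findFrom_eq]
    simp [PySem.Str.find, PySem.Chars.findFrom_zero]
  have hoccB := pv_loop_eq s p hp (s.toList.length + 1) 0 (by omega) (by omega)
  rw [hfind, hoccB, pv_occA_eq s p]
  simp only [Nat.sub_zero]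
  set fl := (List.range' 0 s.toList.length).filter
    (fun pos => PySem.Chars.startswith (s.toList.drop pos) p.toList) with hfl
  by_cases hin : PySem.Str.isIn p s = true
  · obtain ⟨j, hj⟩ := (PySem.Chars.exists_prefix_drop_iff_isIn p.toList s.toList).mpr
      (by rw [← PySem.Str.isIn_eq p s]; exact hin)
    have hjlt : j < s.toList.length := by
      by_contra hge
      have : s.toList.drop j = [] := List.drop_eq_nil_of_le (by omega)
      rw [this] at hj
      exact hp (List.prefix_nil.mp hj)
    have hmem : j ∈ fl := by
      rw [hfl, List.mem_filter]
      exact ⟨List.mem_range'_1.mpr ⟨Nat.zero_le _, by omega⟩,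
        (PySem.Chars.startswith_iff _ _).mpr hj⟩
    have hne : fl ≠ [] := List.ne_nil_of_mem hmem
    rw [if_pos hin, if_neg (by simp [List.isEmpty_iff, hne])]
  · have hempty : fl = [] := by
      rw [hfl, List.filter_eq_nil_iff]
      intro j hj hs
      apply hin
      rw [PySem.Str.isIn_eq]
      exact (PySem.Chars.exists_prefix_drop_iff_isIn p.toList s.toList).mp
        ⟨j, (PySem.Chars.startswith_iff _ _).mp hs⟩
    rw [if_neg hin, hempty]
    simp

-- ===== VERDICT (by name: the statement is the Claim_ definition above) =====
theorem find_prime_number_occurrences_spec : Claim_equal_find_prime_number_occurrences := by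
  intro pi_digits primes _
  unfold Spec_find_prime_number_occurrences
  unfold find_prime_number_occurrences find_prime_number_occurrences_alt
  congr 1
  apply PySem.List.foldl_congr_mem
  intro d prime _
  exact pv_step_eq pi_digits prime d
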